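-- pv_equiv track=rewrite | github.com/tracia-io/tracia-python | tracia/_llm.py | _is_bedrock_model
-- ===== SOURCE A (Python) =====
-- _BEDROCK_VENDOR_PREFIXES = ("anthropic.", "amazon.", "meta.", "mistral.", "cohere.", "deepseek.")
--
-- _KNOWN_REGION_PREFIXES = ("us", "eu", "ap", "sa", "ca", "me", "af")
--
-- def _is_bedrock_model(model: str) -> bool:
--     if any(model.startswith(prefix) for prefix in _BEDROCK_VENDOR_PREFIXES):
--         return True
--     dot = model.find(".")
--     if dot > 0 and model[:dot] in _KNOWN_REGION_PREFIXES:
--         after_region = model[dot + 1 :]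
--         return any(after_region.startswith(prefix) for prefix in _BEDROCK_VENDOR_PREFIXES)
--     return False
-- ===== SOURCE B (Python) =====
-- _BEDROCK_VENDOR_PREFIXES = ("anthropic.", "amazon.", "meta.", "mistral.", "cohere.", "deepseek.")
--
-- _KNOWN_REGION_PREFIXES = ("us", "eu", "ap", "sa", "ca", "me", "af")
--
-- _BEDROCK_FULL_PREFIXES = tuple(
--     region + vendor
--     for region in ("",) + tuple(r + "." for r in _KNOWN_REGION_PREFIXES)
--     for vendor in _BEDROCK_VENDOR_PREFIXES
-- )
--
--
-- def _is_bedrock_model(model: str) -> bool: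
--     return model.startswith(_BEDROCK_FULL_PREFIXES)
-- ===== Notes on version B (the rewrite author's own statement) =====
-- stated objective: idiomatic
-- what changed: B precomputes once the cross product of optional region prefixes and vendor prefixes (48 full prefixes) and reduces the call to a single startswith(tuple) test, eliminating A's find/slice/branch region logic.
import Mathlib
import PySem

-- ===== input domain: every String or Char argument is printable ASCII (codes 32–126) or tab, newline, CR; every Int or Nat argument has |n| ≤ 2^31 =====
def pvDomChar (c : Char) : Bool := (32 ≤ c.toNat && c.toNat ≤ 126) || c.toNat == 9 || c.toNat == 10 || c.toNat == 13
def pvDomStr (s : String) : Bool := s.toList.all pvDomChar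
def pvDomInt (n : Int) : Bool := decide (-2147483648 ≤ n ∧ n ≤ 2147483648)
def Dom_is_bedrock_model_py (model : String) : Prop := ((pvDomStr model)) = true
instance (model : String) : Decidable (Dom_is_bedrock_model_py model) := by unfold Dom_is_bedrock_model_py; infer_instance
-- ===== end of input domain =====

-- B replaces A's find/slice two-branch logic by one startswith test against a
-- precomputed cross product of optional region prefixes and vendor prefixes (idiomatic).

-- ===== PORT A =====
def pvBedrockVendorPrefixes : List String :=
  ["anthropic.", "amazon.", "meta.", "mistral.", "cohere.", "deepseek."]

def pvKnownRegionPrefixes : List String :=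
  ["us", "eu", "ap", "sa", "ca", "me", "af"]

def is_bedrock_model_py (model : String) : Bool :=
  if pvBedrockVendorPrefixes.any (fun prefix_ => PySem.Str.startswith model prefix_) then
    true
  else
    let dot := PySem.Str.find model "."
    if 0 < dot ∧ pvKnownRegionPrefixes.contains (PySem.Str.slice model none (some dot)) then
      let after_region := PySem.Str.slice model (some (dot + 1)) none
      pvBedrockVendorPrefixes.any (fun prefix_ => PySem.Str.startswith after_region prefix_)
    else
      false

-- ===== PORT B =====
def pvBedrockFullPrefixes : List String :=
  ("" :: pvKnownRegionPrefixes.map (fun r => r ++ ".")).flatMap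
    (fun region => pvBedrockVendorPrefixes.map (fun vendor => region ++ vendor))

def is_bedrock_model_py_alt (model : String) : Bool :=
  pvBedrockFullPrefixes.any (fun prefix_ => PySem.Str.startswith model prefix_)

-- ===== PRECONDITION & SPEC =====
def Spec_is_bedrock_model_py (model : String) (out : Bool) : Prop := out = is_bedrock_model_py_alt model
instance (model : String) (out : Bool) : Decidable (Spec_is_bedrock_model_py model out) := by unfold Spec_is_bedrock_model_py; infer_instance

-- ===== CLAIM (what is proved, stated in full; the proofs are below) =====
def Claim_equal_is_bedrock_model_py : Prop := ∀ (model : String), Dom_is_bedrock_model_py model → Spec_is_bedrock_model_py model (is_bedrock_model_py model)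

-- ===== LEMMAS AND PROOFS =====

lemma pvRegionFacts : ∀ r ∈ pvKnownRegionPrefixes, r.toList.length = 2 ∧ '.' ∉ r.toList := by
  decide

-- chars-level core: A's region branch for one region rl and one vendor vl is exactly
-- "the string starts with rl ++ '.' ++ vl"
lemma pvKeyChars (cs rl vl : List Char) (hr : rl.length = 2) (hnd : '.' ∉ rl) :
    (0 < PySem.Chars.find cs ['.'] ∧
     PySem.List.slice cs none (some (PySem.Chars.find cs ['.'])) = rl ∧
     PySem.Chars.startswith (PySem.List.slice cs (some (PySem.Chars.find cs ['.'] + 1)) none) vl = true)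
    ↔ PySem.Chars.startswith cs (rl ++ ['.'] ++ vl) = true := by
  simp only [PySem.Chars.startswith, List.isPrefixOf_iff_prefix]
  constructor
  · rintro ⟨h0, hsl, hsw⟩
    have hf0 : (0 : Int) ≤ PySem.Chars.find cs ['.'] := le_of_lt h0
    rw [PySem.List.slice_to cs hf0] at hsl
    have hlen : (List.take (PySem.Chars.find cs ['.']).toNat cs).length = 2 := by
      rw [hsl, hr]
    have hle : PySem.Chars.find cs ['.'] ≤ (cs.length : Int) := PySem.Chars.find_le_length cs ['.']
    have hn : (PySem.Chars.find cs ['.']).toNat = 2 := by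
      simp only [List.length_take] at hlen
      omega
    obtain ⟨hpre, -⟩ := PySem.Chars.find_spec hf0
    rw [hn] at hpre
    obtain ⟨u, hu⟩ := hpre
    have hcs : cs = rl ++ '.' :: u := by
      conv_lhs => rw [← List.take_append_drop 2 cs]
      rw [← hu, ← hsl, hn]
      simp
    rw [PySem.List.slice_from cs (by omega : (0 : Int) ≤ PySem.Chars.find cs ['.'] + 1)] at hsw
    have h3 : (PySem.Chars.find cs ['.'] + 1).toNat = 3 := by omega
    rw [h3, hcs] at hsw
    have hdrop : List.drop 3 (rl ++ '.' :: u) = u := by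
      have : rl ++ '.' :: u = (rl ++ ['.']) ++ u := by simp
      rw [this]
      exact List.drop_left' (by simp [hr])
    rw [hdrop] at hsw
    obtain ⟨w, hw⟩ := hsw
    exact ⟨w, by rw [hcs, ← hw]; simp⟩
  · rintro ⟨u, hu⟩
    have hcs : cs = rl ++ '.' :: (vl ++ u) := by rw [← hu]; simp
    match rl, hr with
    | [a, b], _ =>
      simp only [List.mem_cons, List.not_mem_nil, or_false, not_or] at hnd
      obtain ⟨ha, hb⟩ := hnd
      have hpre2 : ['.'] <+: List.drop 2 cs := by
        rw [hcs]; exact ⟨vl ++ u, rfl⟩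
      have hf0 : (0 : Int) ≤ PySem.Chars.find cs ['.'] := by
        rw [PySem.Chars.find_nonneg_iff]
        exact (PySem.Chars.isIn_iff_infix ['.'] cs).mp
          ((PySem.Chars.exists_prefix_drop_iff_isIn ['.'] cs).mp ⟨2, hpre2⟩)
      obtain ⟨hp, hmin⟩ := PySem.Chars.find_spec hf0
      have hn2 : (PySem.Chars.find cs ['.']).toNat = 2 := by
        rcases Nat.lt_trichotomy (PySem.Chars.find cs ['.']).toNat 2 with hlt | heq | hgt
        · exfalso
          interval_cases h : (PySem.Chars.find cs ['.']).toNat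
          · rw [hcs] at hp
            rw [List.drop_zero, List.cons_append, List.cons_prefix_cons] at hp
            exact ha hp.1
          · rw [hcs] at hp
            simp only [List.cons_append, List.drop_succ_cons, List.drop_zero] at hp
            rw [List.cons_prefix_cons] at hp
            exact hb hp.1
        · exact heq
        · exact absurd hpre2 (hmin 2 hgt)
      have hf2 : PySem.Chars.find cs ['.'] = 2 := by omega
      refine ⟨by omega, ?_, ?_⟩
      · rw [PySem.List.slice_to cs hf0, hn2, hcs]
        simp
      · rw [PySem.List.slice_from cs (by omega : (0 : Int) ≤ PySem.Chars.find cs ['.'] + 1)]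
        have h3 : (PySem.Chars.find cs ['.'] + 1).toNat = 3 := by omega
        rw [h3, hcs]
        simp only [List.cons_append, List.drop_succ_cons]
        exact ⟨u, rfl⟩

-- String-level form of the key lemma
lemma pvKey (model r v : String) (hr : r.toList.length = 2) (hnd : '.' ∉ r.toList) :
    (0 < PySem.Str.find model "." ∧
     PySem.Str.slice model none (some (PySem.Str.find model ".")) = r ∧
     PySem.Str.startswith (PySem.Str.slice model (some (PySem.Str.find model "." + 1)) none) v = true)
    ↔ PySem.Str.startswith model (r ++ "." ++ v) = true := by
  have hdotL : ("." : String).toList = ['.'] := rfl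
  have hsl : (PySem.Str.slice model none (some (PySem.Str.find model ".")) = r)
      ↔ ((PySem.Str.slice model none (some (PySem.Str.find model "."))).toList = r.toList) :=
    ⟨congrArg String.toList, String.toList_injective⟩
  rw [hsl]
  simp only [PySem.Str.find_eq, PySem.Str.startswith_eq, hdotL]
  have hb : ∀ (a b : Option Int), (PySem.Str.slice model a b).toList
      = PySem.List.slice model.toList a b := by intro a b; simp [PySem.Str.slice]
  rw [hb, hb]
  have happ : (r ++ "." ++ v).toList = r.toList ++ ['.'] ++ v.toList := by
    simp
  rw [happ]
  exact pvKeyChars model.toList r.toList v.toList hr hnd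

lemma pvMain (model : String) : is_bedrock_model_py model = is_bedrock_model_py_alt model := by
  have hempty : (pvBedrockVendorPrefixes.map (fun vendor => "" ++ vendor)) = pvBedrockVendorPrefixes := by
    decide
  simp only [is_bedrock_model_py, is_bedrock_model_py_alt, pvBedrockFullPrefixes,
    List.flatMap_cons, List.any_append, hempty]
  by_cases hv : (pvBedrockVendorPrefixes.any fun prefix_ => PySem.Str.startswith model prefix_) = true
  · rw [if_pos hv, hv, Bool.true_or]
  · have hv' : (pvBedrockVendorPrefixes.any fun prefix_ => PySem.Str.startswith model prefix_) = false := by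
      rwa [Bool.not_eq_true] at hv
    rw [if_neg hv, hv', Bool.false_or]
    rw [Bool.eq_iff_iff]
    constructor
    · intro h
      split_ifs at h with hc
      · obtain ⟨h0, hcont⟩ := hc
        rw [List.contains_eq_mem, decide_eq_true_eq] at hcont
        rw [List.any_eq_true] at h
        obtain ⟨v, hvm, hsw⟩ := h
        obtain ⟨hr2, hrd⟩ := pvRegionFacts _ hcont
        have := (pvKey model _ v hr2 hrd).mp ⟨h0, rfl, hsw⟩
        rw [List.any_eq_true]
        refine ⟨_ ++ "." ++ v, ?_, this⟩
        rw [List.mem_flatMap]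
        exact ⟨_ ++ ".", List.mem_map.mpr ⟨_, hcont, rfl⟩, List.mem_map.mpr ⟨v, hvm, rfl⟩⟩
    · intro h
      rw [List.any_eq_true] at h
      obtain ⟨p, hpm, hsw⟩ := h
      rw [List.mem_flatMap] at hpm
      obtain ⟨region, hregm, hpm⟩ := hpm
      rw [List.mem_map] at hregm hpm
      obtain ⟨r, hrm, rfl⟩ := hregm
      obtain ⟨v, hvm, rfl⟩ := hpm
      obtain ⟨hr2, hrd⟩ := pvRegionFacts _ hrm
      have hkey := (pvKey model r v hr2 hrd).mpr hsw
      obtain ⟨h0, hslice, hafter⟩ := hkey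
      rw [if_pos ⟨h0, by rw [hslice, List.contains_eq_mem, decide_eq_true_eq]; exact hrm⟩]
      rw [List.any_eq_true]
      exact ⟨v, hvm, hafter⟩

-- ===== VERDICT (by name: the statement is the Claim_ definition above) =====
theorem is_bedrock_model_py_spec : Claim_equal_is_bedrock_model_py := by
  intro model _
  unfold Spec_is_bedrock_model_py
  exact pvMain model
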